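-- pv_equiv track=rewrite | github.com/quoth-le-corbeau/advent_of_code | advent_2019/day_8/solutions.py | _get_ordered_layers
-- ===== SOURCE A (Python) =====
-- def _get_ordered_layers(
--     pixels: str, rows: int, columns: int
-- ) -> dict[tuple[int, int], list[str]]:
--     layer_size = rows * columns
--     i = 0
--     grid_look_up = {(r, c): [] for r in range(rows) for c in range(columns)}
--     while i <= len(pixels) - layer_size:
--         layer = iter(pixels[i : i + layer_size])
--         for y in range(rows):
--             for x in range(columns):
--                 grid_look_up[(y, x)].append(next(layer))
--         i += layer_size
--     return grid_look_up
-- ===== SOURCE B (Python) =====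
-- def _get_ordered_layers(
--     pixels: str, rows: int, columns: int
-- ) -> dict[tuple[int, int], list[str]]:
--     layer_size = rows * columns
--     num_layers = len(pixels) // layer_size
--     return {
--         (r, c): [pixels[l * layer_size + r * columns + c] for l in range(num_layers)]
--         for r in range(rows)
--         for c in range(columns)
--     }
-- ===== Notes on version B (the rewrite author's own statement) =====
-- stated objective: alternative
-- what changed: Transposed the loop nesting: instead of a sequential while-loop over layers that appends via an iterator into a pre-built dict, B computes num_layers = len(pixels)//layer_size once and builds the dict in a single comprehension, position-outer / layer-inner, reading each pixel by stride index l*layer_size + r*columns + c; Pre_ excludes only rows*columns <= 0, where A loops forever.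
import Mathlib
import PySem

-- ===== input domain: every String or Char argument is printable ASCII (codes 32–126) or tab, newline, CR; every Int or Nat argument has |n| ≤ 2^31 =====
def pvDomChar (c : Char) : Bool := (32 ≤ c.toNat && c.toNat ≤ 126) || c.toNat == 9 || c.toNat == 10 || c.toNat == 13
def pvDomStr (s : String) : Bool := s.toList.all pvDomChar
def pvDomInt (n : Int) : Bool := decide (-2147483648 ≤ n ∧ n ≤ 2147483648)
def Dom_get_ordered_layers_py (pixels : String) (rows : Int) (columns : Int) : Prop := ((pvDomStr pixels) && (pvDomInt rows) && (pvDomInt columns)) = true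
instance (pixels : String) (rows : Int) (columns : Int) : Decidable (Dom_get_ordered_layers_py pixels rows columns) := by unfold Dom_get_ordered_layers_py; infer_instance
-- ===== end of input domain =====

-- B transposes the loop nesting: position-outer / layer-inner with stride index arithmetic,
-- replacing A's sequential while-loop over layers that appends via an iterator (objective: alternative).


-- ===== PORT A =====
-- the while loop: 'while i <= len(pixels) - layer_size: … i += layer_size'.
-- The '0 < layer_size' half of the guard only totalizes the recursion: when layer_size ≤ 0 and the
-- while-test holds, the Python loop never terminates (those inputs are outside Pre_).
-- next(layer) is ported as indexing the slice at the iterator's position y*columns+x (the number of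
-- next() calls already made); the ' ' default of pyGetD is never reached since the index is < layer_size.
-- grid_look_up[(y,x)].append(ch) is Dict.modify (the key is always present).
def pvALoop (cs : List Char) (rows columns layer_size : Int) (i : Int)
    (grid : PySem.Dict (Int × Int) (List String)) : PySem.Dict (Int × Int) (List String) :=
  if _h : 0 < layer_size ∧ i ≤ (cs.length : Int) - layer_size then
    let layer := PySem.List.slice cs (some i) (some (i + layer_size))
    let grid' := (PySem.List.pyRange 0 rows 1).foldl (fun g y =>
        (PySem.List.pyRange 0 columns 1).foldl (fun g x =>
          g.modify (y, x) [] (fun v => v ++ [String.ofList [PySem.List.pyGetD layer (y * columns + x) ' ']])) g) grid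
    pvALoop cs rows columns layer_size (i + layer_size) grid'
  else grid
termination_by ((cs.length : Int) - i).toNat
decreasing_by omega

def get_ordered_layers_py (pixels : String) (rows : Int) (columns : Int) : List (Int × Int × List String) :=
  let cs := pixels.toList
  let layer_size := rows * columns
  let grid0 : PySem.Dict (Int × Int) (List String) :=
    (PySem.List.pyRange 0 rows 1).foldl (fun d r =>
      (PySem.List.pyRange 0 columns 1).foldl (fun d c => d.insert (r, c) []) d) PySem.Dict.empty
  let grid := pvALoop cs rows columns layer_size 0 grid0
  grid.items.map (fun p => (p.1.1, p.1.2, p.2))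

-- ===== PORT B =====
def get_ordered_layers_py_alt (pixels : String) (rows : Int) (columns : Int) : List (Int × Int × List String) :=
  let cs := pixels.toList
  let layer_size := rows * columns
  let num_layers := PySem.Int.floordiv (cs.length : Int) layer_size
  let d : PySem.Dict (Int × Int) (List String) :=
    (PySem.List.pyRange 0 rows 1).foldl (fun d r =>
      (PySem.List.pyRange 0 columns 1).foldl (fun d c =>
        d.insert (r, c) ((PySem.List.pyRange 0 num_layers 1).map
          (fun l => String.ofList [PySem.List.pyGetD cs (l * layer_size + r * columns + c) ' ']))) d) PySem.Dict.empty
  d.items.map (fun p => (p.1.1, p.1.2, p.2))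

-- ===== PRECONDITION & SPEC =====
-- A terminates exactly when layer_size = rows*columns is positive: for layer_size ≤ 0 the while loop
-- (step i += layer_size ≤ 0, test always true) never terminates, so those inputs are outside Pre_.
def Pre_get_ordered_layers_py (pixels : String) (rows : Int) (columns : Int) : Prop :=
  0 < rows * columns
instance (pixels : String) (rows : Int) (columns : Int) : Decidable (Pre_get_ordered_layers_py pixels rows columns) := by unfold Pre_get_ordered_layers_py; infer_instance

def pvWitness_get_ordered_layers_py : String × Int × Int := ("123456789abc", 2, 3)

def Spec_get_ordered_layers_py (pixels : String) (rows : Int) (columns : Int) (out : List (Int × Int × List String)) : Prop := out = get_ordered_layers_py_alt pixels rows columns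
instance (pixels : String) (rows : Int) (columns : Int) (out : List (Int × Int × List String)) : Decidable (Spec_get_ordered_layers_py pixels rows columns out) := by unfold Spec_get_ordered_layers_py; infer_instance

-- ===== CLAIM (what is proved, stated in full; the proofs are below) =====
def Claim_equal_get_ordered_layers_py : Prop := ∀ (pixels : String) (rows : Int) (columns : Int), Dom_get_ordered_layers_py pixels rows columns → Pre_get_ordered_layers_py pixels rows columns → Spec_get_ordered_layers_py pixels rows columns (get_ordered_layers_py pixels rows columns)

-- ===== LEMMAS AND PROOFS =====

-- the list of grid positions, in comprehension order
def pvPairs (rows columns : Int) : List (Int × Int) :=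
  (PySem.List.pyRange 0 rows 1).flatMap (fun r => (PySem.List.pyRange 0 columns 1).map (fun c => (r, c)))

-- the 1-character string at index j of the pixel string
def pvChr (cs : List Char) (j : Int) : String := String.ofList [PySem.List.pyGetD cs j ' ']

theorem pvNodup_pyRange (b : Int) : (PySem.List.pyRange 0 b 1).Nodup := by
  rcases le_or_gt b 0 with h | h
  · have : PySem.List.pyRange 0 b 1 = [] := by simp [PySem.List.pyRange]; omega
    simp [this]
  · have hb : b = ((b.toNat : Nat) : Int) := by omega
    rw [hb, PySem.List.pyRange_zero_natCast]
    exact List.Nodup.map (fun a b h => by exact_mod_cast h) List.nodup_range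

theorem pvPairs_nodup (rows cols : Int) : (pvPairs rows cols).Nodup := by
  rw [pvPairs, List.nodup_flatMap]
  constructor
  · intro x _
    exact List.Nodup.map (fun b1 b2 h => (Prod.mk.injEq _ _ _ _ ▸ h).2) (pvNodup_pyRange cols)
  · refine List.Nodup.pairwise_of_forall_ne (pvNodup_pyRange rows) ?_
    intro a _ b _ hab
    simp only [Function.onFun, List.disjoint_left]
    intro p hp hq
    simp only [List.mem_map] at hp hq
    obtain ⟨x, -, rfl⟩ := hp
    obtain ⟨y, -, h2⟩ := hq
    exact hab (congrArg Prod.fst h2).symm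

theorem pvMem_pairs {rows cols : Int} {rc : Int × Int} (h : rc ∈ pvPairs rows cols) :
    0 ≤ rc.1 ∧ rc.1 < rows ∧ 0 ≤ rc.2 ∧ rc.2 < cols := by
  rw [pvPairs, List.mem_flatMap] at h
  obtain ⟨r, hr, hm⟩ := h
  rw [List.mem_map] at hm
  obtain ⟨c, hc, rfl⟩ := hm
  rw [PySem.List.mem_pyRange_one] at hr hc
  exact ⟨hr.1, hr.2, hc.1, hc.2⟩

-- Set.update is a no-op when every element is already present (specific combination; not in the library)
theorem pvSet_update_self {α : Type} [BEq α] [LawfulBEq α] (l : List α) :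
    ∀ s : PySem.Set α, (∀ x ∈ l, x ∈ s) → PySem.Set.update s l = s := by
  induction l with
  | nil => intro s _; rfl
  | cons a t ih =>
    intro s hs
    have ha : PySem.Set.add s a = s := by
      simp [PySem.Set.add, PySem.Set.contains, hs a (by simp)]
    show PySem.Set.update (PySem.Set.add s a) t = s
    rw [ha]
    exact ih s (fun x hx => hs x (by simp [hx]))

-- a nested position fold is the fold over pvPairs
theorem pvFold_pairs {γ : Type} (rows cols : Int) (g : γ → Int × Int → γ) (init : γ) :
    (PySem.List.pyRange 0 rows 1).foldl (fun d r =>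
      (PySem.List.pyRange 0 cols 1).foldl (fun d c => g d (r, c)) d) init =
    (pvPairs rows cols).foldl g init := by
  rw [pvPairs, List.foldl_flatMap]
  simp only [List.foldl_map]

-- items of the initial grid
theorem pvGrid0_items (rows cols : Int) :
    ((PySem.List.pyRange 0 rows 1).foldl (fun d r =>
      (PySem.List.pyRange 0 cols 1).foldl (fun d c => d.insert (r, c) ([] : List String)) d)
      PySem.Dict.empty).items = (pvPairs rows cols).map (fun rc => (rc, ([] : List String))) := by
  rw [pvFold_pairs rows cols (fun d rc => d.insert rc ([] : List String)) PySem.Dict.empty]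
  rw [PySem.Dict.items_foldl_insert_fresh (pvPairs rows cols) (fun rc => rc) (fun _ => ([] : List String))
      PySem.Dict.empty (fun a _ => PySem.Dict.contains_empty _) (by simpa using pvPairs_nodup rows cols)]
  simp [PySem.Dict.empty]

-- getD through one layer's modify sweep
theorem pvStep_getD (rows cols : Int) (g : Int × Int → String)
    (grid : PySem.Dict (Int × Int) (List String)) (rc : Int × Int) (hrc : rc ∈ pvPairs rows cols) :
    ((pvPairs rows cols).foldl (fun d p => d.modify p [] (fun v => v ++ [g p])) grid).getD rc []
      = grid.getD rc [] ++ [g rc] := by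
  have hfold : (pvPairs rows cols).foldl (fun d p => d.modify p [] (fun v => v ++ [g p])) grid
      = ((pvPairs rows cols).map (fun p => (p, g p))).foldl
          (fun d q => d.modify q.1 [] (fun v => v ++ [q.2])) grid := by
    rw [List.foldl_map]
  rw [hfold, PySem.Dict.getD_foldl_modify_append]
  have hf : List.filter (fun q => q.1 == rc) ((pvPairs rows cols).map (fun p => (p, g p)))
      = [(rc, g rc)] := by
    rw [List.filter_map]
    have hp : ((fun q : (Int × Int) × String => q.1 == rc) ∘ (fun p => (p, g p)))
        = (fun p => p == rc) := rfl
    rw [hp, List.filter_beq, List.count_eq_one_of_mem (pvPairs_nodup rows cols) hrc]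
    rfl
  rw [hf]
  rfl

theorem pvStep_keys (rows cols : Int) (g : Int × Int → String)
    (grid : PySem.Dict (Int × Int) (List String)) (hk : grid.keys = pvPairs rows cols) :
    ((pvPairs rows cols).foldl (fun d p => d.modify p [] (fun v => v ++ [g p])) grid).keys
      = pvPairs rows cols := by
  rw [PySem.Dict.keys_foldl_modify (pvPairs rows cols) [] (fun _ p v => v ++ [g p]) grid, hk]
  exact pvSet_update_self (pvPairs rows cols) (pvPairs rows cols) (fun x hx => hx)

-- the slice-index view of next(layer)
theorem pvSlice_chr (cs : List Char) (i ls idx : Int) (h0 : 0 ≤ i) (h1 : i + ls ≤ (cs.length : Int))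
    (h2 : 0 ≤ idx) (h3 : idx < ls) :
    String.ofList [PySem.List.pyGetD (PySem.List.slice cs (some i) (some (i + ls))) idx ' '] = pvChr cs (i + idx) := by
  rw [pvChr]
  have key : PySem.List.pyGetD (PySem.List.slice cs (some i) (some (i + ls))) idx ' '
      = PySem.List.pyGetD cs (i + idx) ' ' := by
    rw [PySem.List.slice_toNat cs h0 (by omega)]
    have hlen : ((cs.drop i.toNat).take ((i + ls).toNat - i.toNat)).length = ls.toNat := by
      simp [List.length_take, List.length_drop]
      omega
    rw [PySem.List.pyGetD_eq_getElem _ _ h2 (by rw [hlen]; omega),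
      PySem.List.pyGetD_eq_getElem _ _ (by omega) (by omega)]
    rw [List.getElem_take, List.getElem_drop]
    · congr 1
      omega
  rw [key]

theorem pvFloordiv_small (a b : Int) (h0 : 0 ≤ a) (h1 : a < b) : PySem.Int.floordiv a b = 0 := by
  rw [PySem.Int.floordiv_eq_ediv_of_pos (by omega)]
  exact Int.ediv_eq_zero_of_lt h0 h1
theorem pvIdx_bound (r c rows cols : Int) (h1 : 0 ≤ r) (h2 : r < rows) (h3 : 0 ≤ c) (h4 : c < cols) :
    0 ≤ r * cols + c ∧ r * cols + c < rows * cols := by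
  constructor
  · nlinarith
  · nlinarith
theorem pvRange_shift (m' : Int) (h : 0 ≤ m') (F : Int → String) :
    (PySem.List.pyRange 0 (m' + 1) 1).map F = F 0 :: (PySem.List.pyRange 0 m' 1).map (fun l => F (l + 1)) := by
  have hm : m' = ((m'.toNat : Nat) : Int) := by omega
  rw [hm]
  have : ((m'.toNat : Nat) : Int) + 1 = ((m'.toNat + 1 : Nat) : Int) := by push_cast; ring
  rw [this, PySem.List.pyRange_zero_natCast, PySem.List.pyRange_zero_natCast, List.range_succ_eq_map]
  simp only [List.map_map, List.map_cons, Nat.cast_zero]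
  refine congrArg (F 0 :: ·) ?_
  exact List.map_congr_left (fun a _ => by simp only [Function.comp_apply, Nat.succ_eq_add_one]; push_cast; ring_nf)

theorem pvALoop_eq_step (cs : List Char) (rows cols ls i : Int)
    (grid : PySem.Dict (Int × Int) (List String)) (h : 0 < ls ∧ i ≤ (cs.length : Int) - ls) :
    pvALoop cs rows cols ls i grid = pvALoop cs rows cols ls (i + ls)
      ((PySem.List.pyRange 0 rows 1).foldl (fun g y =>
        (PySem.List.pyRange 0 cols 1).foldl (fun g x =>
          g.modify (y, x) [] (fun v => v ++
            [String.ofList [PySem.List.pyGetD (PySem.List.slice cs (some i) (some (i + ls))) (y * cols + x) ' ']])) g)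
        grid) := by
  rw [pvALoop, dif_pos h]

-- the main loop invariant
theorem pvALoop_spec (cs : List Char) (rows cols ls : Int) (hls : ls = rows * cols) (hpos : 0 < ls) :
    ∀ i (grid : PySem.Dict (Int × Int) (List String)), 0 ≤ i → i ≤ (cs.length : Int) →
      grid.keys = pvPairs rows cols →
      (pvALoop cs rows cols ls i grid).keys = pvPairs rows cols ∧
      ∀ rc ∈ pvPairs rows cols,
        (pvALoop cs rows cols ls i grid).getD rc [] =
          grid.getD rc [] ++
            (PySem.List.pyRange 0 (PySem.Int.floordiv ((cs.length : Int) - i) ls) 1).map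
              (fun l => pvChr cs (i + l * ls + rc.1 * cols + rc.2)) := by
  suffices H : ∀ fuel : Nat, ∀ i (grid : PySem.Dict (Int × Int) (List String)),
      ((cs.length : Int) - i).toNat ≤ fuel → 0 ≤ i → i ≤ (cs.length : Int) →
      grid.keys = pvPairs rows cols →
      (pvALoop cs rows cols ls i grid).keys = pvPairs rows cols ∧
      ∀ rc ∈ pvPairs rows cols,
        (pvALoop cs rows cols ls i grid).getD rc [] =
          grid.getD rc [] ++
            (PySem.List.pyRange 0 (PySem.Int.floordiv ((cs.length : Int) - i) ls) 1).map
              (fun l => pvChr cs (i + l * ls + rc.1 * cols + rc.2)) by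
    intro i grid h0 h1 hk
    exact H _ i grid le_rfl h0 h1 hk
  intro fuel
  induction fuel with
  | zero =>
    intro i grid hf h0 h1 hk
    have hstop : ¬ (0 < ls ∧ i ≤ (cs.length : Int) - ls) := by omega
    rw [pvALoop, dif_neg hstop]
    refine ⟨hk, fun rc _ => ?_⟩
    have : (cs.length : Int) - i = 0 := by omega
    rw [this, pvFloordiv_small 0 ls le_rfl hpos]
    simp
  | succ f ih =>
    intro i grid hf h0 h1 hk
    by_cases hcond : i ≤ (cs.length : Int) - ls
    · rw [pvALoop_eq_step cs rows cols ls i grid ⟨hpos, hcond⟩]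
      -- the per-layer sweep, as a fold over pvPairs
      have hfold := pvFold_pairs rows cols
        (fun g p => g.modify p [] (fun v => v ++
          [String.ofList [PySem.List.pyGetD (PySem.List.slice cs (some i) (some (i + ls))) (p.1 * cols + p.2) ' ']]))
        grid
      rw [hfold]
      set grid' := (pvPairs rows cols).foldl
        (fun g p => g.modify p [] (fun v => v ++
          [String.ofList [PySem.List.pyGetD (PySem.List.slice cs (some i) (some (i + ls))) (p.1 * cols + p.2) ' ']]))
        grid with hgrid'
      have hk' : grid'.keys = pvPairs rows cols := pvStep_keys rows cols _ grid hk
      have hrec := ih (i + ls) grid' (by omega) (by omega) (by omega) hk'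
      refine ⟨hrec.1, fun rc hrc => ?_⟩
      rw [hrec.2 rc hrc]
      have hb := pvMem_pairs hrc
      have hidx := pvIdx_bound rc.1 rc.2 rows cols hb.1 hb.2.1 hb.2.2.1 hb.2.2.2
      have hstep : grid'.getD rc [] = grid.getD rc [] ++
          [pvChr cs (i + (rc.1 * cols + rc.2))] := by
        rw [hgrid', pvStep_getD rows cols _ grid rc hrc,
          pvSlice_chr cs i ls _ h0 (by omega) hidx.1 (by omega)]
      rw [hstep]
      have hm : PySem.Int.floordiv ((cs.length : Int) - i) ls =
          PySem.Int.floordiv ((cs.length : Int) - (i + ls)) ls + 1 := by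
        rw [PySem.Int.floordiv_eq_ediv_of_pos hpos, PySem.Int.floordiv_eq_ediv_of_pos hpos]
        have h1 : (cs.length : Int) - i = ((cs.length : Int) - (i + ls)) + 1 * ls := by ring
        rw [h1, Int.add_mul_ediv_right _ _ (by omega)]
      have hm' : 0 ≤ PySem.Int.floordiv ((cs.length : Int) - (i + ls)) ls := by
        rw [PySem.Int.floordiv_eq_ediv_of_pos hpos]
        exact Int.ediv_nonneg (by omega) (by omega)
      rw [hm, pvRange_shift _ hm' (fun l => pvChr cs (i + l * ls + rc.1 * cols + rc.2))]
      simp only [List.append_assoc, List.cons_append, List.nil_append]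
      refine congrArg (grid.getD rc [] ++ ·) ?_
      refine congrArg₂ List.cons (by ring_nf) ?_
      exact (List.map_congr_left (fun l _ => by ring_nf)).symm
    · rw [pvALoop, dif_neg (by omega)]
      refine ⟨hk, fun rc _ => ?_⟩
      rw [pvFloordiv_small _ ls (by omega) (by omega)]
      simp

theorem pvGrid0_getD (rows cols : Int) (rc : Int × Int) (hrc : rc ∈ pvPairs rows cols) :
    ((PySem.List.pyRange 0 rows 1).foldl (fun d r =>
      (PySem.List.pyRange 0 cols 1).foldl (fun d c => d.insert (r, c) ([] : List String)) d)
      PySem.Dict.empty).getD rc [] = [] := by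
  refine PySem.Dict.getD_of_mem_items _ ?_ ?_ []
  · rw [pvGrid0_items]
    exact List.mem_map.mpr ⟨rc, hrc, rfl⟩
  · show (List.map _ _).Nodup
    rw [pvGrid0_items, List.map_map]
    have hid : ((fun x : (Int × Int) × List String => x.1) ∘ fun rc : Int × Int => (rc, ([] : List String))) = id := rfl
    rw [hid, List.map_id]
    exact pvPairs_nodup rows cols

theorem pvGrid0_keys (rows cols : Int) :
    ((PySem.List.pyRange 0 rows 1).foldl (fun d r =>
      (PySem.List.pyRange 0 cols 1).foldl (fun d c => d.insert (r, c) ([] : List String)) d)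
      PySem.Dict.empty).keys = pvPairs rows cols := by
  show List.map _ _ = _
  rw [pvGrid0_items, List.map_map]
  have hid : ((fun x : (Int × Int) × List String => x.1) ∘ fun rc : Int × Int => (rc, ([] : List String))) = id := rfl
  rw [hid, List.map_id]

-- ===== VERDICT (by name: the statement is the Claim_ definition above) =====
theorem get_ordered_layers_py_spec : Claim_equal_get_ordered_layers_py := by
  intro pixels rows columns _ hpre
  show get_ordered_layers_py pixels rows columns = get_ordered_layers_py_alt pixels rows columns
  have hpos : 0 < rows * columns := hpre
  set cs := pixels.toList with hcs
  set ls := rows * columns with hls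
  rw [get_ordered_layers_py, get_ordered_layers_py_alt]
  refine congrArg (List.map _) ?_
  set grid0 : PySem.Dict (Int × Int) (List String) :=
    (PySem.List.pyRange 0 rows 1).foldl (fun d r =>
      (PySem.List.pyRange 0 columns 1).foldl (fun d c => d.insert (r, c) []) d) PySem.Dict.empty with hgrid0
  -- A's final grid
  have hspec := pvALoop_spec cs rows columns ls rfl hpos 0 grid0 le_rfl (by positivity)
    (pvGrid0_keys rows columns)
  have hnodup : (pvALoop cs rows columns ls 0 grid0).keys.Nodup := by
    rw [hspec.1]; exact pvPairs_nodup rows columns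
  rw [PySem.Dict.items_eq_map_keys _ hnodup [], hspec.1]
  -- B's dict
  have hfoldB := pvFold_pairs rows columns
    (fun d p => d.insert p ((PySem.List.pyRange 0 (PySem.Int.floordiv (cs.length : Int) ls) 1).map
      (fun l => String.ofList [PySem.List.pyGetD cs (l * ls + p.1 * columns + p.2) ' '])))
    PySem.Dict.empty
  rw [hfoldB, PySem.Dict.items_foldl_insert_fresh (pvPairs rows columns) (fun rc => rc) _
    PySem.Dict.empty (fun a _ => PySem.Dict.contains_empty _) (by simpa using pvPairs_nodup rows columns)]
  have hempty : (PySem.Dict.empty : PySem.Dict (Int × Int) (List String)).items = [] := rfl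
  rw [hempty, List.nil_append]
  refine List.map_congr_left (fun rc hrc => ?_)
  rw [hspec.2 rc hrc, pvGrid0_getD rows columns rc hrc, List.nil_append]
  refine congrArg (Prod.mk rc) ?_
  rw [show (cs.length : Int) - 0 = (cs.length : Int) by ring]
  exact List.map_congr_left (fun l _ => by rw [pvChr]; norm_num)
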